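-- pv_equiv track=rewrite | github.com/rspraneeth/codes-py | arrays_prefixIndexAndOthers.py | pfeven_pfodd
-- ===== SOURCE A (Python) =====
-- def pfeven_pfodd(A):
--     """combining pfodd(returns an array of size len(A), with sum of odd indices values up to the index)
--     and pfeven(returns an array of size len(A), with sum of even indices values up to the index)"""
--     pfeven = [0] * len(A)
--     pfeven[0] = A[0]
--     pfodd = [0] * len(A)
--     pfodd[0] = 0
--     for i in range(1, len(A)):
--         if i % 2 == 1:
--             pfeven[i] = pfeven[i-1]
--             pfodd[i] = A[i] + pfodd[i - 1]
--         else: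
--             pfeven[i] = A[i] + pfeven[i - 1]
--             pfodd[i] = pfodd[i - 1]
--     return pfeven, pfodd
-- ===== SOURCE B (Python) =====
-- def _prefix(xs):
--     out = []
--     s = 0
--     for x in xs:
--         s += x
--         out.append(s)
--     return out
--
--
-- def pfeven_pfodd(A):
--     evens = [x if i % 2 == 0 else 0 for i, x in enumerate(A)]
--     odds = [x if i % 2 == 1 else 0 for i, x in enumerate(A)]
--     return _prefix(evens), _prefix(odds)
-- ===== Notes on version B (the rewrite author's own statement) =====
-- stated objective: simpler
-- what changed: Replaces the index-driven loop that writes into two preallocated arrays via parity branching with two masked comprehensions followed by a generic running-prefix-sum helper.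
import Mathlib
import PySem

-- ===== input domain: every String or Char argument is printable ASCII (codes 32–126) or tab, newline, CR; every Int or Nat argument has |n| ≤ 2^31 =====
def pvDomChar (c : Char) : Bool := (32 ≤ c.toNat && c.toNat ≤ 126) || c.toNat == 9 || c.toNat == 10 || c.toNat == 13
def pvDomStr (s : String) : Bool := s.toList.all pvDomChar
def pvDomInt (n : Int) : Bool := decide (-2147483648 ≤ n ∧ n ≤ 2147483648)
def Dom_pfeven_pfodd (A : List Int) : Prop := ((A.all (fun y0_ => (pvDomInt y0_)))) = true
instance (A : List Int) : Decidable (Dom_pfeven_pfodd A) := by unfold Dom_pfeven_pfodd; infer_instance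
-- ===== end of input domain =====

-- B replaces A's index loop writing into preallocated arrays by two masked
-- comprehensions plus a generic running-prefix-sum helper (objective: simpler).

-- ===== PORT A =====
-- Every list index A's loop uses is provably in range on Pre_ (A ≠ []),
-- so Python indexing is ported as pyGetD _ _ 0 (= pyGet? there, never the default).
def pfeven_pfodd (A : List Int) : List Int × List Int :=
  let n := A.length
  let pfe0 := (List.replicate n (0:Int)).set 0 (PySem.List.pyGetD A 0 0)  -- the initial index-zero assignment
  let pfo0 := (List.replicate n (0:Int)).set 0 0                          -- pfodd[0] = 0
  (PySem.List.pyRange 1 (n:Int)).foldl (fun st i =>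
    if PySem.Int.mod i 2 = 1 then
      (st.1.set i.toNat (PySem.List.pyGetD st.1 (i-1) 0),
       st.2.set i.toNat (PySem.List.pyGetD A i 0 + PySem.List.pyGetD st.2 (i-1) 0))
    else
      (st.1.set i.toNat (PySem.List.pyGetD A i 0 + PySem.List.pyGetD st.1 (i-1) 0),
       st.2.set i.toNat (PySem.List.pyGetD st.2 (i-1) 0))) (pfe0, pfo0)

-- ===== PORT B =====
def pvPrefix (xs : List Int) : List Int :=
  (xs.foldl (fun (st : List Int × Int) x => (st.1 ++ [st.2 + x], st.2 + x)) ([], 0)).1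

def pfeven_pfodd_alt (A : List Int) : List Int × List Int :=
  let evens := (PySem.List.enumerate A).map (fun p => if PySem.Int.mod p.1 2 = 0 then p.2 else 0)
  let odds  := (PySem.List.enumerate A).map (fun p => if PySem.Int.mod p.1 2 = 1 then p.2 else 0)
  (pvPrefix evens, pvPrefix odds)

-- ===== PRECONDITION & SPEC =====
-- Pre_ excludes only the empty list, on which A raises IndexError at its initial assignment of index zero.
def Pre_pfeven_pfodd (A : List Int) : Prop := A ≠ []
instance (A : List Int) : Decidable (Pre_pfeven_pfodd A) := by unfold Pre_pfeven_pfodd; infer_instance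
def pvWitness_pfeven_pfodd : List Int := [3, -1, 4]

def Spec_pfeven_pfodd (A : List Int) (out : List Int × List Int) : Prop := out = pfeven_pfodd_alt A
instance (A : List Int) (out : List Int × List Int) : Decidable (Spec_pfeven_pfodd A out) := by unfold Spec_pfeven_pfodd; infer_instance

-- ===== CLAIM (what is proved, stated in full; the proofs are below) =====
def Claim_equal_pfeven_pfodd : Prop := ∀ (A : List Int), Dom_pfeven_pfodd A → Pre_pfeven_pfodd A → Spec_pfeven_pfodd A (pfeven_pfodd A)

-- ===== LEMMAS AND PROOFS =====

-- Reference shape of B's prefix-sum fold: running sums starting from s.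
def psum : List Int → Int → List Int
  | [], _ => []
  | x :: xs, s => (s + x) :: psum xs (s + x)

theorem psum_eq_map (xs : List Int) (s : Int) :
    psum xs s = (List.range xs.length).map (fun k => s + ((xs.take (k+1)).sum)) := by
  induction xs generalizing s with
  | nil => simp [psum]
  | cons x xs ih =>
    simp only [psum, ih, List.length_cons, List.range_succ_eq_map, List.map_cons, List.map_map]
    congr 1
    · simp
    · apply List.map_congr_left
      intro k _
      simp [List.take_succ_cons, add_assoc]

theorem pvPrefix_fold (xs : List Int) (out : List Int) (s : Int) :
    xs.foldl (fun (st : List Int × Int) x => (st.1 ++ [st.2 + x], st.2 + x)) (out, s)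
      = (out ++ psum xs s, s + xs.sum) := by
  induction xs generalizing out s with
  | nil => simp [psum]
  | cons x xs ih => simp [psum, ih, add_assoc]

theorem pvPrefix_eq (xs : List Int) : pvPrefix xs = psum xs 0 := by
  simp [pvPrefix, pvPrefix_fold]

theorem length_psum (xs : List Int) (s : Int) : (psum xs s).length = xs.length := by
  simp [psum_eq_map]

theorem enum_map_getElem? {β : Type} (A : List Int) (f : Int × Int → β) (s : Int) (i : Nat) :
    ((PySem.List.enumerate A s).map f)[i]? = A[i]?.map (fun x => f (s + i, x)) := by
  induction A generalizing s i with
  | nil => simp [PySem.List.enumerate]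
  | cons a A ih =>
    cases i with
    | zero => simp [PySem.List.enumerate_cons]
    | succ i =>
      simp only [PySem.List.enumerate_cons, List.map_cons, List.getElem?_cons_succ, ih]
      congr 1
      funext x
      congr 2
      push_cast; ring

def evA (A : List Int) : List Int :=
  (PySem.List.enumerate A).map (fun p => if PySem.Int.mod p.1 2 = 0 then p.2 else 0)
def odA (A : List Int) : List Int :=
  (PySem.List.enumerate A).map (fun p => if PySem.Int.mod p.1 2 = 1 then p.2 else 0)

theorem alt_eq (A : List Int) : pfeven_pfodd_alt A = (psum (evA A) 0, psum (odA A) 0) := by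
  simp [pfeven_pfodd_alt, evA, odA, pvPrefix_eq]

theorem length_evA (A : List Int) : (evA A).length = A.length := by
  simp [evA, PySem.List.length_enumerate]
theorem length_odA (A : List Int) : (odA A).length = A.length := by
  simp [odA, PySem.List.length_enumerate]

theorem mask_getElem? (A : List Int) (r : Int) (i : Nat) (h : i < A.length) :
    ((PySem.List.enumerate A).map (fun p => if PySem.Int.mod p.1 2 = r then p.2 else 0))[i]?
      = some (if ((i % 2 : Nat) : Int) = r then A[i] else 0) := by
  rw [enum_map_getElem?, List.getElem?_eq_getElem h]
  have hm : PySem.Int.mod (0 + (i:Int)) 2 = ((i % 2 : Nat) : Int) := by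
    rw [zero_add]; exact_mod_cast PySem.Int.mod_natCast i 2
  simp only [Option.map_some, hm]

theorem evA_getElem (A : List Int) (i : Nat) (h : i < A.length) :
    (evA A)[i]'(by rw [length_evA]; exact h) = if i % 2 = 0 then A[i] else 0 := by
  apply Option.some.inj
  rw [← List.getElem?_eq_getElem]
  have h0 : (evA A)[i]? = some (if ((i % 2 : Nat) : Int) = 0 then A[i] else 0) :=
    mask_getElem? A 0 i h
  rw [h0]
  rcases Nat.mod_two_eq_zero_or_one i with h' | h' <;> simp [h']

theorem odA_getElem (A : List Int) (i : Nat) (h : i < A.length) :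
    (odA A)[i]'(by rw [length_odA]; exact h) = if i % 2 = 1 then A[i] else 0 := by
  apply Option.some.inj
  rw [← List.getElem?_eq_getElem]
  have h0 : (odA A)[i]? = some (if ((i % 2 : Nat) : Int) = 1 then A[i] else 0) :=
    mask_getElem? A 1 i h
  rw [h0]
  rcases Nat.mod_two_eq_zero_or_one i with h' | h' <;> simp [h']

theorem psum_getElem (xs : List Int) (s : Int) (k : Nat) (hk : k < xs.length) :
    (psum xs s)[k]'(by rw [length_psum]; exact hk) = s + ((xs.take (k+1)).sum) := by
  simp [psum_eq_map]

theorem take_succ_getElem (xs : List Int) (k : Nat) (hk : k < xs.length) :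
    List.take (k+1) xs = List.take k xs ++ [xs[k]] := by
  rw [List.take_add_one, List.getElem?_eq_getElem hk]
  rfl

theorem psum_step (xs : List Int) (s : Int) (k : Nat) (hk1 : 1 ≤ k) (hk : k < xs.length) :
    (psum xs s)[k]'(by rw [length_psum]; exact hk)
      = (psum xs s)[k-1]'(by rw [length_psum]; omega) + xs[k] := by
  rw [psum_getElem xs s k hk, psum_getElem xs s (k-1) (by omega)]
  have h1 : (k - 1) + 1 = k := by omega
  have h3 : (List.take (k+1) xs).sum = (List.take k xs).sum + xs[k] := by
    rw [take_succ_getElem xs k hk, List.sum_append, List.sum_cons, List.sum_nil]; ring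
  rw [h1, h3]; ring

-- reading index (k-1) of the partially-filled state list
theorem read_state (L : List Int) {n k : Nat} (hL : L.length = n) (hk1 : 1 ≤ k) (hk : k ≤ n) :
    PySem.List.pyGetD (L.take k ++ List.replicate (n - k) (0:Int)) ((k:Int) - 1) 0
      = L[k-1]'(by omega) := by
  have hc : ((k:Int) - 1) = ((k-1 : Nat) : Int) := by omega
  have hlen : (L.take k ++ List.replicate (n - k) (0:Int)).length = n := by
    simp [hL]; omega
  rw [hc, PySem.List.pyGetD_eq_getElem _ _ (by positivity)
      (by rw [hlen]; exact_mod_cast (by omega : k - 1 < n))]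
  simp only [Int.toNat_natCast]
  rw [List.getElem_append_left (by simp [hL]; omega)]
  exact List.getElem_take
      
-- writing index k of the partially-filled state list
theorem write_state (L : List Int) {n k : Nat} (hL : L.length = n) (hk : k < n) :
    (L.take k ++ List.replicate (n - k) (0:Int)).set k (L[k]'(by omega))
      = L.take (k+1) ++ List.replicate (n - (k+1)) (0:Int) := by
  rw [List.set_append]
  have hlen : (L.take k).length = k := by simp [hL]; omega
  rw [if_neg (by omega)]
  have h1 : n - k = (n - (k+1)) + 1 := by omega
  rw [h1, List.replicate_succ, hlen, Nat.sub_self, List.set_cons_zero,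
      take_succ_getElem L k (by omega), List.append_assoc]
  rfl

theorem base_state (L : List Int) {n : Nat} (hL : L.length = n) (h : 1 ≤ n) (v : Int)
    (hv : v = L[0]'(by omega)) :
    (List.replicate n (0:Int)).set 0 v = L.take 1 ++ List.replicate (n-1) 0 := by
  obtain ⟨m, rfl⟩ : ∃ m, n = m + 1 := ⟨n-1, by omega⟩
  rw [List.replicate_succ, List.set_cons_zero]
  have ht : L.take 1 = [L[0]'(by omega)] := by
    rw [take_succ_getElem L 0 (by omega), List.take_zero, List.nil_append]
  rw [ht, hv, Nat.add_sub_cancel, List.singleton_append]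

theorem getElem_psum_zero (xs : List Int) (h : 0 < xs.length) :
    (psum xs 0)[0]'(by rw [length_psum]; exact h) = xs[0] := by
  rw [psum_getElem xs 0 0 h]
  have ht : xs.take (0+1) = [xs[0]] := by
    rw [take_succ_getElem xs 0 h, List.take_zero, List.nil_append]
  rw [ht, List.sum_cons, List.sum_nil]
  ring

theorem loop_inv (A : List Int) (k : Nat) (h1 : 1 ≤ k) (h2 : k ≤ A.length) :
    (PySem.List.pyRange 1 (k:Int)).foldl (fun st i =>
      if PySem.Int.mod i 2 = 1 then
        (st.1.set i.toNat (PySem.List.pyGetD st.1 (i-1) 0),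
         st.2.set i.toNat (PySem.List.pyGetD A i 0 + PySem.List.pyGetD st.2 (i-1) 0))
      else
        (st.1.set i.toNat (PySem.List.pyGetD A i 0 + PySem.List.pyGetD st.1 (i-1) 0),
         st.2.set i.toNat (PySem.List.pyGetD st.2 (i-1) 0)))
      ((List.replicate A.length (0:Int)).set 0 (PySem.List.pyGetD A 0 0),
       (List.replicate A.length (0:Int)).set 0 0)
    = ((psum (evA A) 0).take k ++ List.replicate (A.length - k) 0,
       (psum (odA A) 0).take k ++ List.replicate (A.length - k) 0) := by
  have hle : (psum (evA A) 0).length = A.length := by rw [length_psum, length_evA]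
  have hlo : (psum (odA A) 0).length = A.length := by rw [length_psum, length_odA]
  revert h2
  induction k, h1 using Nat.le_induction with
  | base =>
    intro h2
    rw [Nat.cast_one, PySem.List.pyRange_one_eq_nil le_rfl, List.foldl_nil]
    have hA0 : PySem.List.pyGetD A 0 0 = A[0]'(by omega) := by
      rw [PySem.List.pyGetD_eq_getElem A 0 le_rfl (by exact_mod_cast h2)]
      rfl
    refine Prod.ext ?_ ?_
    · show (List.replicate A.length (0:Int)).set 0 (PySem.List.pyGetD A 0 0) = _
      refine base_state _ hle h2 _ ?_
      rw [hA0, getElem_psum_zero (evA A) (by rw [length_evA]; omega),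
          evA_getElem A 0 (by omega)]
      simp
    · show (List.replicate A.length (0:Int)).set 0 0 = _
      refine base_state _ hlo h2 _ ?_
      rw [getElem_psum_zero (odA A) (by rw [length_odA]; omega),
          odA_getElem A 0 (by omega)]
      simp
  | succ k hk ih =>
    intro h2
    have hik := ih (by omega)
    have hc : ((k+1:Nat):Int) = (k:Int) + 1 := by push_cast; ring
    rw [hc, PySem.List.pyRange_one_succ_right (by exact_mod_cast hk), List.foldl_append, hik,
        List.foldl_cons, List.foldl_nil]
    have hmod : PySem.Int.mod (k:Int) 2 = ((k % 2 : Nat) : Int) := by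
      exact_mod_cast PySem.Int.mod_natCast k 2
    have hAk : PySem.List.pyGetD A (k:Int) 0 = A[k]'(by omega) := by
      rw [PySem.List.pyGetD_eq_getElem A 0 (by positivity)
          (by exact_mod_cast (by omega : k < A.length))]
      simp
    have hre := read_state (psum (evA A) 0) hle hk (by omega)
    have hro := read_state (psum (odA A) 0) hlo hk (by omega)
    rcases Nat.mod_two_eq_zero_or_one k with hp | hp
    · rw [hmod, hp, if_neg (by simp)]
      simp only [Int.toNat_natCast, Prod.mk.injEq]
      refine ⟨?_, ?_⟩
      · rw [hAk, hre]
        have hv : A[k]'(by omega) + (psum (evA A) 0)[k-1]'(by omega)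
            = (psum (evA A) 0)[k]'(by omega) := by
          rw [psum_step (evA A) 0 k hk (by rw [length_evA]; omega),
              evA_getElem A k (by omega), if_pos hp]
          ring
        rw [hv, write_state _ hle (by omega)]
      · rw [hro]
        have hv : (psum (odA A) 0)[k-1]'(by omega) = (psum (odA A) 0)[k]'(by omega) := by
          rw [psum_step (odA A) 0 k hk (by rw [length_odA]; omega),
              odA_getElem A k (by omega), hp]
          norm_num
        rw [hv, write_state _ hlo (by omega)]
    · rw [hmod, hp, if_pos (by simp)]
      simp only [Int.toNat_natCast, Prod.mk.injEq]
      refine ⟨?_, ?_⟩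
      · rw [hre]
        have hv : (psum (evA A) 0)[k-1]'(by omega) = (psum (evA A) 0)[k]'(by omega) := by
          rw [psum_step (evA A) 0 k hk (by rw [length_evA]; omega),
              evA_getElem A k (by omega), hp]
          norm_num
        rw [hv, write_state _ hle (by omega)]
      · rw [hAk, hro]
        have hv : A[k]'(by omega) + (psum (odA A) 0)[k-1]'(by omega)
            = (psum (odA A) 0)[k]'(by omega) := by
          rw [psum_step (odA A) 0 k hk (by rw [length_odA]; omega),
              odA_getElem A k (by omega), if_pos hp]
          ring
        rw [hv, write_state _ hlo (by omega)]

-- ===== VERDICT (by name: the statement is the Claim_ definition above) =====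
theorem pfeven_pfodd_spec : Claim_equal_pfeven_pfodd := by
  intro A _ hpre
  unfold Spec_pfeven_pfodd
  rw [alt_eq]
  have hn : 1 <= A.length := List.length_pos_iff.mpr hpre
  show pfeven_pfodd A = _
  unfold pfeven_pfodd
  rw [loop_inv A A.length hn le_rfl]
  have he : (psum (evA A) 0).length = A.length := by rw [length_psum, length_evA]
  have ho : (psum (odA A) 0).length = A.length := by rw [length_psum, length_odA]
  simp [he, ho, List.take_of_length_le]
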